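-- pv_equiv track=rewrite | github.com/jaychsu/algorithm | other/candy_crush.py | _check_board_valid
-- ===== SOURCE A (Python) =====
-- def _check_board_valid(board):
--     # for testing
--     m, n = len(board), len(board[0])
--
--     for x in range(2, m):
--         for y in range(n):
--             if board[x][y] == board[x - 1][y] == board[x - 2][y]:
--                 return False
--
--     for y in range(2, n):
--         for x in range(m):
--             if board[x][y] == board[x][y - 1] == board[x][y - 2]:
--                 return False
--
--     return True
-- ===== SOURCE B (Python) =====
-- def _check_board_valid(board):
--     # Single top-down pass maintaining run-length counters: a streaming horizontal
--     # run counter per row and a per-column vertical run-length list updated row by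
--     # row; a run reaching length 3 means the board is invalid.
--     def hscan(row):
--         hrun, last = 0, None
--         for v in row:
--             hrun = hrun + 1 if last is not None and v == last else 1
--             if hrun == 3:
--                 return False
--             last = v
--         return True
--
--     prev, vruns = None, []
--     for row in board:
--         if not hscan(row):
--             return False
--         if prev is None:
--             vruns = [1] * len(row)
--         else:
--             vruns = [u + 1 if v == pv else 1 for v, pv, u in zip(row, prev, vruns)]
--             if any(u == 3 for u in vruns):
--                 return False
--         prev = row
--     return True
-- ===== Notes on version B (the rewrite author's own statement) =====
-- stated objective: alternative
-- what changed: Replaces A's two staged scans that compare every (x,y) triple with a single top-down pass maintaining run-length counters (a streaming horizontal run counter per row and one vertical run-length list updated per row); invalid iff some run reaches 3. Pre_ admits nonempty rectangular boards (the natural domain) plus the tiny boards (<=2 rows, rows <=2 cells) whose loops A never enters: on an empty board A raises IndexError, and on other ragged boards A raises or inspects only the first row's width while B scans full rows.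
-- outside the precondition, e.g. on _check_board_valid([[5], [1, 1, 1], [1, 1, 1]]): A returns True, B returns False
import Mathlib
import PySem

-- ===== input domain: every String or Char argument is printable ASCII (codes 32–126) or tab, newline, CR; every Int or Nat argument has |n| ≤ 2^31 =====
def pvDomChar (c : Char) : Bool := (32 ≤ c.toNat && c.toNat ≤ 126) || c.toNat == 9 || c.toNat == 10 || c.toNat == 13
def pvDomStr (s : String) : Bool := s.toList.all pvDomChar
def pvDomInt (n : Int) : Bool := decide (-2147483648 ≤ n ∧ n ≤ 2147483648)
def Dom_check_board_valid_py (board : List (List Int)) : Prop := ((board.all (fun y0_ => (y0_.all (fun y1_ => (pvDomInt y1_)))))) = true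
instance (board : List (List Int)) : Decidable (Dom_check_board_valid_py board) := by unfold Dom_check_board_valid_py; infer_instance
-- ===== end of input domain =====

-- B replaces A's two staged triple-comparison scans with a single top-down pass maintaining
-- run-length counters (streaming horizontal counter per row, one vertical run-length list
-- updated row by row); objective: alternative algorithm, same O(m*n) cost.

-- ===== PORT A =====
def check_board_valid_py (board : List (List Int)) : Bool :=
  let m : Int := board.length
  let n : Int := (PySem.List.pyGetD board 0 []).length
  if (PySem.List.pyRange 2 m 1).any (fun x =>
       (PySem.List.pyRange 0 n 1).any (fun y =>
         (PySem.List.pyGetD (PySem.List.pyGetD board x []) y 0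
            == PySem.List.pyGetD (PySem.List.pyGetD board (x - 1) []) y 0)
         && (PySem.List.pyGetD (PySem.List.pyGetD board (x - 1) []) y 0
            == PySem.List.pyGetD (PySem.List.pyGetD board (x - 2) []) y 0)))
  then false
  else if (PySem.List.pyRange 2 n 1).any (fun y =>
       (PySem.List.pyRange 0 m 1).any (fun x =>
         (PySem.List.pyGetD (PySem.List.pyGetD board x []) y 0
            == PySem.List.pyGetD (PySem.List.pyGetD board x []) (y - 1) 0)
         && (PySem.List.pyGetD (PySem.List.pyGetD board x []) (y - 1) 0
            == PySem.List.pyGetD (PySem.List.pyGetD board x []) (y - 2) 0)))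
  then false
  else true

-- ===== PORT B =====
-- hscan(row): streaming horizontal run counter; False as soon as a run reaches 3
def pvHScan : List Int → Int → Option Int → Bool
  | [], _, _ => true
  | v :: rest, hrun, last =>
    let hrun' : Int := if last.elim false (fun l => v == l) then hrun + 1 else 1
    if hrun' == 3 then false else pvHScan rest hrun' (some v)

-- [u + 1 if v == pv else 1 for v, pv, u in zip(row, prev, vruns)]
def pvBStep (row p vruns : List Int) : List Int :=
  (row.zip (p.zip vruns)).map (fun t => if t.1 == t.2.1 then t.2.2 + 1 else 1)

def pvBLoop : List (List Int) → Option (List Int) → List Int → Bool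
  | [], _, _ => true
  | row :: rest, none, _ =>
    if ! pvHScan row 0 none then false
    else pvBLoop rest (some row) (List.replicate row.length 1)
  | row :: rest, some p, vruns =>
    if ! pvHScan row 0 none then false
    else if (pvBStep row p vruns).any (fun u => u == 3) then false
    else pvBLoop rest (some row) (pvBStep row p vruns)

def check_board_valid_py_alt (board : List (List Int)) : Bool :=
  pvBLoop board none []

-- ===== PRECONDITION & SPEC =====
-- Pre_ admits nonempty rectangular boards (the function's natural domain) and the tiny boards
-- (at most 2 rows, every row at most 2 cells) whose loops A never enters: on an empty board A
-- raises IndexError, and on other ragged boards A raises or inspects only the first row's width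
-- while B scans full rows.
def Pre_check_board_valid_py (board : List (List Int)) : Prop :=
  board ≠ [] ∧ ((∀ row ∈ board, row.length = (board.headD []).length) ∨
    (board.length ≤ 2 ∧ ∀ row ∈ board, row.length ≤ 2))
instance (board : List (List Int)) : Decidable (Pre_check_board_valid_py board) := by
  unfold Pre_check_board_valid_py; infer_instance

def pvWitness_check_board_valid_py : List (List Int) := [[1, 2], [2, 1], [1, 2]]

def Spec_check_board_valid_py (board : List (List Int)) (out : Bool) : Prop := out = check_board_valid_py_alt board
instance (board : List (List Int)) (out : Bool) : Decidable (Spec_check_board_valid_py board out) := by unfold Spec_check_board_valid_py; infer_instance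

-- ===== CLAIM (what is proved, stated in full; the proofs are below) =====
def Claim_equal_check_board_valid_py : Prop := ∀ (board : List (List Int)), Dom_check_board_valid_py board → Pre_check_board_valid_py board → Spec_check_board_valid_py board (check_board_valid_py board)

-- ===== LEMMAS AND PROOFS =====

-- some row of `rows` contains three consecutive equal cells
def pvHasTriple (rows : List (List Int)) : Prop :=
  ∃ j : Nat, j < rows.length ∧ ∃ i : Nat, i + 2 < (rows.getD j []).length ∧
    ((rows.getD j []).getD i 0 = (rows.getD j []).getD (i+1) 0 ∧
     (rows.getD j []).getD (i+1) 0 = (rows.getD j []).getD (i+2) 0)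

-- window form of "row has no three consecutive equal cells" (proof-only device)
def pvRowClean (row : List Int) : Bool :=
  ((row.zip row.tail).zip row.tail.tail).all (fun t => !((t.1.1 == t.1.2) && (t.1.2 == t.2)))

def pvClean (rows : List (List Int)) : Bool := rows.all pvRowClean

theorem forall_mem_getD {α : Type} (l : List α) (d : α) (p : α → Prop) :
    (∀ x ∈ l, p x) ↔ ∀ j, j < l.length → p (l.getD j d) := by
  constructor
  · intro h j hj
    rw [List.getD_eq_getElem _ _ hj]
    exact h _ (List.getElem_mem hj)
  · intro h x hx
    obtain ⟨j, hj, rfl⟩ := List.mem_iff_getElem.mp hx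
    have := h j hj
    rwa [List.getD_eq_getElem _ _ hj] at this

theorem pvColGetD (board : List (List Int)) (y x : Nat) (hx : x < board.length) :
    (board.map (fun r => r.getD y 0)).getD x 0 = (board.getD x []).getD y 0 := by
  induction board generalizing x with
  | nil => simp at hx
  | cons r rs ih =>
    cases x with
    | zero => simp
    | succ k => simpa using ih k (by simpa using hx)

theorem rowClean_iff (row : List Int) :
    pvRowClean row = true ↔
      ∀ i : Nat, i + 2 < row.length →
        ¬(row.getD i 0 = row.getD (i+1) 0 ∧ row.getD (i+1) 0 = row.getD (i+2) 0) := by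
  induction row with
  | nil => simp [pvRowClean]
  | cons a s ih =>
    cases s with
    | nil => simp [pvRowClean]
    | cons b t =>
      cases t with
      | nil => simp [pvRowClean]
      | cons c rest =>
        have hstep : pvRowClean (a :: b :: c :: rest)
            = ((!((a == b) && (b == c))) && pvRowClean (b :: c :: rest)) := rfl
        rw [hstep, Bool.and_eq_true, ih]
        constructor
        · rintro ⟨h1, h2⟩ i hi
          cases i with
          | zero =>
            simp only [List.getD_cons_zero, List.getD_cons_succ]
            simp only [Bool.not_eq_eq_eq_not, Bool.not_true, Bool.and_eq_false_iff,
              beq_eq_false_iff_ne, ne_eq] at h1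
            tauto
          | succ j =>
            simp only [List.getD_cons_succ]
            exact h2 j (by simp at hi ⊢; omega)
        · intro h
          refine ⟨?_, ?_⟩
          · have := h 0 (by simp)
            simp only [List.getD_cons_zero, List.getD_cons_succ] at this
            simp only [Bool.not_eq_eq_eq_not, Bool.not_true, Bool.and_eq_false_iff,
              beq_eq_false_iff_ne, ne_eq]
            tauto
          · intro j hj
            have := h (j+1) (by simp at hj ⊢; omega)
            simpa using this

theorem all_clean_iff (rows : List (List Int)) :
    (rows.all pvRowClean = true) ↔ ¬ pvHasTriple rows := by
  rw [List.all_eq_true]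
  constructor
  · rintro h ⟨j, hj, i, hi, ht⟩
    exact (rowClean_iff _).mp ((forall_mem_getD rows [] _).mp h j hj) i hi ht
  · intro h
    refine (forall_mem_getD rows [] (fun r => pvRowClean r = true)).mpr ?_
    intro j hj
    rw [rowClean_iff]
    intro i hi ht
    exact h ⟨j, hj, i, hi, ht⟩

theorem hor_iff (board : List (List Int)) (n : Nat)
    (hlen : ∀ j, j < board.length → ((board.getD j []).length = n)) :
    (((PySem.List.pyRange 2 (n : Int) 1).any (fun y =>
      (PySem.List.pyRange 0 (board.length : Int) 1).any (fun x =>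
        (PySem.List.pyGetD (PySem.List.pyGetD board x []) y 0
           == PySem.List.pyGetD (PySem.List.pyGetD board x []) (y - 1) 0)
        && (PySem.List.pyGetD (PySem.List.pyGetD board x []) (y - 1) 0
           == PySem.List.pyGetD (PySem.List.pyGetD board x []) (y - 2) 0)))) = true)
    ↔ pvHasTriple board := by
  simp only [List.any_eq_true, PySem.List.mem_pyRange_one, Bool.and_eq_true, beq_iff_eq]
  constructor
  · rintro ⟨y, ⟨hy2, hyn⟩, x, ⟨hx0, hxm⟩, h1, h2⟩
    have hxm' : x.toNat < board.length := by omega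
    rw [PySem.List.pyGetD_of_nonneg board [] hx0] at h1 h2
    have hrn : (board.getD x.toNat []).length = n := hlen _ hxm'
    have hc : ∀ z : Int, 0 ≤ z →
        PySem.List.pyGetD (board.getD x.toNat []) z 0 = (board.getD x.toNat []).getD z.toNat 0 :=
      fun z hz0 => PySem.List.pyGetD_of_nonneg _ 0 hz0
    rw [hc y (by omega), hc (y-1) (by omega)] at h1
    rw [hc (y-1) (by omega), hc (y-2) (by omega)] at h2
    have e1 : (y-2).toNat + 1 = (y-1).toNat := by omega
    have e2 : (y-2).toNat + 2 = y.toNat := by omega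
    refine ⟨x.toNat, hxm', (y-2).toNat, by rw [hrn]; omega, ?_, ?_⟩
    · rw [e1]; exact h2.symm
    · rw [e1, e2]; exact h1.symm
  · rintro ⟨j, hj, i, hi, t1, t2⟩
    have hrn := hlen j hj
    have hval : ∀ z : Int, 0 ≤ z →
        PySem.List.pyGetD (PySem.List.pyGetD board (j : Int) []) z 0
          = (board.getD j []).getD z.toNat 0 := by
      intro z hz0
      rw [PySem.List.pyGetD_of_nonneg board [] (by omega)]
      simp only [Int.toNat_natCast]
      exact PySem.List.pyGetD_of_nonneg _ 0 hz0
    refine ⟨(i : Int) + 2, ⟨by omega, by omega⟩, (j : Int), ⟨by omega, by exact_mod_cast hj⟩, ?_, ?_⟩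
    · rw [hval ((i : Int) + 2) (by omega), hval ((i : Int) + 2 - 1) (by omega)]
      rw [show ((i : Int) + 2).toNat = i + 2 by omega, show ((i : Int) + 2 - 1).toNat = i + 1 by omega]
      exact t2.symm
    · rw [hval ((i : Int) + 2 - 1) (by omega), hval ((i : Int) + 2 - 2) (by omega)]
      rw [show ((i : Int) + 2 - 1).toNat = i + 1 by omega, show ((i : Int) + 2 - 2).toNat = i by omega]
      exact t1.symm

theorem vert_iff (board : List (List Int)) (n : Nat)
    (_hlen : ∀ j, j < board.length → ((board.getD j []).length = n)) :
    (((PySem.List.pyRange 2 (board.length : Int) 1).any (fun x =>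
      (PySem.List.pyRange 0 (n : Int) 1).any (fun y =>
        (PySem.List.pyGetD (PySem.List.pyGetD board x []) y 0
           == PySem.List.pyGetD (PySem.List.pyGetD board (x - 1) []) y 0)
        && (PySem.List.pyGetD (PySem.List.pyGetD board (x - 1) []) y 0
           == PySem.List.pyGetD (PySem.List.pyGetD board (x - 2) []) y 0)))) = true)
    ↔ pvHasTriple ((List.range n).map (fun y => board.map (fun r => r.getD y 0))) := by
  simp only [List.any_eq_true, PySem.List.mem_pyRange_one, Bool.and_eq_true, beq_iff_eq]
  constructor
  · rintro ⟨x, ⟨hx2, hxm⟩, y, ⟨hy0, hyn⟩, h1, h2⟩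
    have hrow : ∀ z : Int, 0 ≤ z →
        PySem.List.pyGetD (PySem.List.pyGetD board z []) y 0 = (board.getD z.toNat []).getD y.toNat 0 := by
      intro z hz0
      rw [PySem.List.pyGetD_of_nonneg board [] hz0]
      exact PySem.List.pyGetD_of_nonneg _ 0 hy0
    rw [hrow x (by omega), hrow (x-1) (by omega)] at h1
    rw [hrow (x-1) (by omega), hrow (x-2) (by omega)] at h2
    refine ⟨y.toNat, ?_, (x-2).toNat, ?_, ?_, ?_⟩
    · simp only [List.length_map, List.length_range]
      omega
    · rw [PySem.List.getD_map_range _ _ _ _ (by omega : y.toNat < n)]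
      simp only [List.length_map]
      omega
    · rw [PySem.List.getD_map_range _ _ _ _ (by omega : y.toNat < n)]
      rw [pvColGetD _ _ _ (by omega), pvColGetD _ _ _ (by omega)]
      rw [show (x-2).toNat + 1 = (x-1).toNat by omega]
      exact h2.symm
    · rw [PySem.List.getD_map_range _ _ _ _ (by omega : y.toNat < n)]
      rw [pvColGetD _ _ _ (by omega), pvColGetD _ _ _ (by omega)]
      rw [show (x-2).toNat + 1 = (x-1).toNat by omega, show (x-2).toNat + 2 = x.toNat by omega]
      exact h1.symm
  · rintro ⟨j, hj, i, hi, t1, t2⟩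
    simp only [List.length_map, List.length_range] at hj
    rw [PySem.List.getD_map_range _ _ _ _ hj] at hi t1 t2
    simp only [List.length_map] at hi
    rw [pvColGetD _ _ _ (by omega), pvColGetD _ _ _ (by omega)] at t1
    rw [pvColGetD _ _ _ (by omega), pvColGetD _ _ _ (by omega)] at t2
    have hrow : ∀ z : Int, 0 ≤ z →
        PySem.List.pyGetD (PySem.List.pyGetD board z []) (j : Int) 0
          = (board.getD z.toNat []).getD j 0 := by
      intro z hz0
      rw [PySem.List.pyGetD_of_nonneg board [] hz0]
      rw [PySem.List.pyGetD_of_nonneg _ 0 (by omega : (0:Int) ≤ (j : Int))]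
      simp
    refine ⟨(i : Int) + 2, ⟨by omega, by omega⟩, (j : Int), ⟨by omega, by exact_mod_cast hj⟩, ?_, ?_⟩
    · rw [hrow ((i:Int)+2) (by omega), hrow ((i:Int)+2-1) (by omega)]
      rw [show ((i : Int) + 2).toNat = i + 2 by omega, show ((i : Int) + 2 - 1).toNat = i + 1 by omega]
      exact t2.symm
    · rw [hrow ((i:Int)+2-1) (by omega), hrow ((i:Int)+2-2) (by omega)]
      rw [show ((i : Int) + 2 - 1).toNat = i + 1 by omega, show ((i : Int) + 2 - 2).toNat = i by omega]
      exact t1.symm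

theorem pvIteAnd (c1 c2 b1 b2 : Bool)
    (H1 : c1 = true ↔ ¬(b1 = true)) (H2 : c2 = true ↔ ¬(b2 = true)) :
    (if c1 then false else if c2 then false else true) = (b2 && b1) := by
  revert H1 H2
  cases c1 <;> cases c2 <;> cases b1 <;> cases b2 <;> decide

-- ===== B-side lemmas: the streaming run counter computes pvRowClean =====

theorem pvAllCongr {α : Type} (l : List α) (f g : α → Bool)
    (h : ∀ x ∈ l, f x = g x) : l.all f = l.all g := by
  induction l with
  | nil => rfl
  | cons a t ih =>
    simp only [List.all_cons, h a (List.mem_cons_self ..),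
      ih (fun x hx => h x (List.mem_cons_of_mem _ hx))]

theorem hscan_step (v : Int) (rest : List Int) (hrun : Int) (l : Int) :
    pvHScan (v :: rest) hrun (some l)
      = (if (if v == l then hrun + 1 else 1) == 3 then false
         else pvHScan rest (if v == l then hrun + 1 else 1) (some v)) := rfl

theorem hscan_step_none (v : Int) (rest : List Int) (hrun : Int) :
    pvHScan (v :: rest) hrun none
      = (if (1:Int) == 3 then false else pvHScan rest 1 (some v)) := rfl

theorem rowClean_cons3 (a b c : Int) (t : List Int) :
    pvRowClean (a :: b :: c :: t) = ((!((a == b) && (b == c))) && pvRowClean (b :: c :: t)) := rfl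

theorem hscan_pair (r : List Int) :
    (∀ a : Int, pvHScan r 1 (some a) = pvRowClean (a :: r)) ∧
    (∀ b : Int, pvHScan r 2 (some b) = pvRowClean (b :: b :: r)) := by
  induction r with
  | nil => exact ⟨fun a => rfl, fun b => rfl⟩
  | cons v rest ih =>
    constructor
    · intro a
      rw [hscan_step]
      by_cases hva : v = a
      · subst hva
        simp only [beq_self_eq_true, if_true, show (1+1:Int) = 2 from rfl]
        rw [if_neg (by decide), ih.2 v]
      · have hbeq : (v == a) = false := beq_eq_false_iff_ne.mpr hva
        have hab : (a == v) = false := beq_eq_false_iff_ne.mpr (Ne.symm hva)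
        rw [hbeq]
        simp only [Bool.false_eq_true, if_false]
        rw [if_neg (by decide), ih.1 v]
        cases rest with
        | nil => rfl
        | cons c t =>
          rw [rowClean_cons3 a v c t, hab]
          simp
    · intro b
      rw [hscan_step]
      by_cases hvb : v = b
      · subst hvb
        simp only [beq_self_eq_true, if_true, show (2+1:Int) = 3 from rfl]
        rw [rowClean_cons3]
        simp
      · have hbeq : (v == b) = false := beq_eq_false_iff_ne.mpr hvb
        have hbv : (b == v) = false := beq_eq_false_iff_ne.mpr (Ne.symm hvb)
        rw [hbeq]
        simp only [Bool.false_eq_true, if_false]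
        rw [if_neg (by decide), ih.1 v]
        rw [rowClean_cons3 b b v rest, hbv]
        cases rest with
        | nil => simp [pvRowClean]
        | cons c t =>
          rw [rowClean_cons3 b v c t, hbv]
          simp

theorem hscan_zero (r : List Int) : pvHScan r 0 none = pvRowClean r := by
  cases r with
  | nil => rfl
  | cons v rest =>
    rw [hscan_step_none, if_neg (by decide), (hscan_pair rest).1 v]

theorem pvBStep_length (r p vruns : List Int) :
    (pvBStep r p vruns).length = min r.length (min p.length vruns.length) := by
  simp [pvBStep]

theorem pvBStep_getD (r p vruns : List Int) (n y : Nat)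
    (hr : r.length = n) (hp : p.length = n) (hv : vruns.length = n) (hy : y < n) :
    (pvBStep r p vruns).getD y 0
      = (if r.getD y 0 == p.getD y 0 then vruns.getD y 0 + 1 else 1) := by
  have hlen : (pvBStep r p vruns).length = n := by
    rw [pvBStep_length, hr, hp, hv]; omega
  rw [List.getD_eq_getElem _ _ (by omega), List.getD_eq_getElem _ _ (by omega),
    List.getD_eq_getElem _ _ (by omega), List.getD_eq_getElem _ _ (by omega)]
  simp [pvBStep, List.getElem_zip]

theorem pvBStep_any (r p vruns : List Int) (n : Nat)
    (hr : r.length = n) (hp : p.length = n) (hv : vruns.length = n) :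
    ((pvBStep r p vruns).any (fun u => u == 3) = true)
      ↔ ∃ y, y < n ∧ (if r.getD y 0 == p.getD y 0 then vruns.getD y 0 + 1 else 1) = (3 : Int) := by
  have hlen : (pvBStep r p vruns).length = n := by
    rw [pvBStep_length, hr, hp, hv]; omega
  rw [List.any_eq_true]
  constructor
  · rintro ⟨u, hu, hu3⟩
    obtain ⟨y, hy, rfl⟩ := List.mem_iff_getElem.mp hu
    refine ⟨y, by omega, ?_⟩
    rw [← pvBStep_getD r p vruns n y hr hp hv (by omega),
      List.getD_eq_getElem _ _ hy]
    exact beq_iff_eq.mp hu3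
  · rintro ⟨y, hy, h3⟩
    refine ⟨(pvBStep r p vruns)[y]'(by omega), List.getElem_mem _, ?_⟩
    rw [show (pvBStep r p vruns)[y]'(by omega) = (pvBStep r p vruns).getD y 0 from
      (List.getD_eq_getElem _ _ (by omega)).symm,
      pvBStep_getD r p vruns n y hr hp hv hy]
    exact beq_iff_eq.mpr h3

theorem pvBLoop_char (n : Nat) (rest : List (List Int)) :
    ∀ (p vruns : List Int),
    (∀ r ∈ rest, r.length = n) → p.length = n → vruns.length = n →
    pvBLoop rest (some p) vruns
      = (rest.all pvRowClean &&
         (List.range n).all (fun y =>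
            pvHScan (rest.map (fun r => r.getD y 0)) (vruns.getD y 0) (some (p.getD y 0)))) := by
  induction rest with
  | nil =>
    intro p vruns _ _ _
    simp [pvBLoop, pvHScan]
  | cons r rest' ih =>
    intro p vruns hlen hp hv
    have hr : r.length = n := hlen r (List.mem_cons_self ..)
    have hcol : ∀ y, y < n →
        pvHScan ((r :: rest').map (fun row => row.getD y 0)) (vruns.getD y 0) (some (p.getD y 0))
          = (if (if r.getD y 0 == p.getD y 0 then vruns.getD y 0 + 1 else 1) == 3 then false
             else pvHScan (rest'.map (fun row => row.getD y 0))
                    (if r.getD y 0 == p.getD y 0 then vruns.getD y 0 + 1 else 1)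
                    (some (r.getD y 0))) := by
      intro y _
      rfl
    by_cases hs : pvHScan r 0 none = true
    · have hclean : pvRowClean r = true := by rw [← hscan_zero]; exact hs
      rw [show pvBLoop (r :: rest') (some p) vruns
            = (if ! pvHScan r 0 none then false
               else if (pvBStep r p vruns).any (fun u => u == 3) then false
               else pvBLoop rest' (some r) (pvBStep r p vruns)) from rfl,
        hs]
      simp only [Bool.not_true, Bool.false_eq_true, if_false]
      by_cases hany : (pvBStep r p vruns).any (fun u => u == 3) = true
      · rw [if_pos hany]
        obtain ⟨y, hy, h3⟩ := (pvBStep_any r p vruns n hr hp hv).mp hany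
        have hcolf : pvHScan ((r :: rest').map (fun row => row.getD y 0)) (vruns.getD y 0)
            (some (p.getD y 0)) = false := by
          rw [hcol y hy, if_pos (beq_iff_eq.mpr h3)]
        have : (List.range n).all (fun y =>
            pvHScan ((r :: rest').map (fun row => row.getD y 0)) (vruns.getD y 0)
              (some (p.getD y 0))) = false := by
          rw [List.all_eq_false]
          exact ⟨y, List.mem_range.mpr hy, by rw [hcolf]; simp⟩
        rw [this]
        simp
      · rw [if_neg hany]
        have hv' : (pvBStep r p vruns).length = n := by
          rw [pvBStep_length, hr, hp, hv]; omega
        rw [ih r (pvBStep r p vruns) (fun x hx => hlen x (List.mem_cons_of_mem _ hx)) hr hv']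
        have hnone : ∀ y, y < n →
            (if r.getD y 0 == p.getD y 0 then vruns.getD y 0 + 1 else 1) ≠ (3 : Int) := by
          intro y hy hcon
          exact hany ((pvBStep_any r p vruns n hr hp hv).mpr ⟨y, hy, hcon⟩)
        have hcols : (List.range n).all (fun y =>
              pvHScan ((r :: rest').map (fun row => row.getD y 0)) (vruns.getD y 0)
                (some (p.getD y 0)))
            = (List.range n).all (fun y =>
              pvHScan (rest'.map (fun row => row.getD y 0)) ((pvBStep r p vruns).getD y 0)
                (some (r.getD y 0))) := by
          refine pvAllCongr _ _ _ (fun y hy => ?_)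
          have hy' : y < n := List.mem_range.mp hy
          rw [hcol y hy', if_neg (by simpa using hnone y hy'),
            pvBStep_getD r p vruns n y hr hp hv hy']
        rw [← hcols]
        simp [hclean]
    · have hclean : pvRowClean r = false := by
        rw [← hscan_zero]; exact Bool.not_eq_true _ ▸ (by simpa using hs)
      rw [show pvBLoop (r :: rest') (some p) vruns
            = (if ! pvHScan r 0 none then false
               else if (pvBStep r p vruns).any (fun u => u == 3) then false
               else pvBLoop rest' (some r) (pvBStep r p vruns)) from rfl]
      rw [Bool.not_eq_true] at hs
      rw [hs]
      simp [hclean]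

-- B computes "rows clean AND columns clean" on nonempty rectangular boards
theorem alt_char (r0 : List Int) (rest : List (List Int))
    (hlen : ∀ row ∈ rest, row.length = r0.length) :
    check_board_valid_py_alt (r0 :: rest)
      = (pvClean (r0 :: rest) &&
         pvClean ((List.range r0.length).map (fun y =>
            (r0 :: rest).map (fun r => r.getD y 0)))) := by
  rw [show check_board_valid_py_alt (r0 :: rest)
        = (if ! pvHScan r0 0 none then false
           else pvBLoop rest (some r0) (List.replicate r0.length 1)) from rfl]
  by_cases hs : pvHScan r0 0 none = true
  · have hclean : pvRowClean r0 = true := by rw [← hscan_zero]; exact hs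
    rw [hs]
    simp only [Bool.not_true, Bool.false_eq_true, if_false]
    rw [pvBLoop_char r0.length rest r0 (List.replicate r0.length 1) hlen rfl
      (List.length_replicate)]
    have hcols : (List.range r0.length).all (fun y =>
          pvHScan (rest.map (fun r => r.getD y 0)) ((List.replicate r0.length (1:Int)).getD y 0)
            (some (r0.getD y 0)))
        = (List.range r0.length).all (fun y =>
          pvRowClean ((r0 :: rest).map (fun r => r.getD y 0))) := by
      refine pvAllCongr _ _ _ (fun y hy => ?_)
      rw [List.getD_replicate 1 (List.mem_range.mp hy), (hscan_pair _).1 (r0.getD y 0)]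
      rfl
    rw [hcols]
    simp [pvClean, hclean, List.all_map, Function.comp_def]
  · rw [Bool.not_eq_true] at hs
    have hclean : pvRowClean r0 = false := by rw [← hscan_zero]; exact hs
    rw [hs]
    simp [pvClean, hclean]

-- rows of length ≤ 2 have no horizontal window at all
theorem rowClean_short (r : List Int) (h : r.length ≤ 2) : pvRowClean r = true := by
  cases r with
  | nil => rfl
  | cons a s =>
    cases s with
    | nil => rfl
    | cons b t =>
      cases t with
      | nil => rfl
      | cons c u => simp at h

-- on boards with ≤ 2 rows and rows of ≤ 2 cells, B never sees a run of 3
theorem small_alt (r0 : List Int) (rest : List (List Int))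
    (hm : (r0 :: rest).length ≤ 2) (hw : ∀ row ∈ r0 :: rest, row.length ≤ 2) :
    check_board_valid_py_alt (r0 :: rest) = true := by
  have h0 : pvHScan r0 0 none = true := by
    rw [hscan_zero]; exact rowClean_short r0 (hw r0 (List.mem_cons_self ..))
  cases rest with
  | nil =>
    rw [show check_board_valid_py_alt [r0]
          = (if ! pvHScan r0 0 none then false else pvBLoop [] (some r0)
              (List.replicate r0.length 1)) from rfl, h0]
    rfl
  | cons r1 rest' =>
    cases rest' with
    | cons _ _ => simp at hm
    | nil =>
      have h1 : pvHScan r1 0 none = true := by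
        rw [hscan_zero]
        exact rowClean_short r1 (hw r1 (List.mem_cons_of_mem _ (List.mem_cons_self ..)))
      have hany : (pvBStep r1 r0 (List.replicate r0.length 1)).any (fun u => u == 3) = false := by
        rw [List.any_eq_false]
        intro u hu
        obtain ⟨t, ht, rfl⟩ := List.mem_map.mp hu
        have h2 : t.2.2 ∈ List.replicate r0.length (1 : Int) :=
          ((List.of_mem_zip ((List.of_mem_zip ht).2)).2)
        rw [List.eq_of_mem_replicate h2]
        by_cases hc : (t.1 == t.2.1) = true <;> simp [hc]
      rw [show check_board_valid_py_alt [r0, r1]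
            = (if ! pvHScan r0 0 none then false
               else if ! pvHScan r1 0 none then false
               else if (pvBStep r1 r0 (List.replicate r0.length 1)).any (fun u => u == 3) then false
               else pvBLoop [] (some r1) (pvBStep r1 r0 (List.replicate r0.length 1))) from rfl,
        h0, h1, hany]
      rfl

-- on such boards A's two range loops are empty
theorem small_A (r0 : List Int) (rest : List (List Int))
    (hm : (r0 :: rest).length ≤ 2) (hn : r0.length ≤ 2) :
    check_board_valid_py (r0 :: rest) = true := by
  simp only [check_board_valid_py, PySem.List.pyGetD_zero_cons]
  rw [PySem.List.pyRange_one_eq_nil (by exact_mod_cast hm : (((r0 :: rest).length : Int) ≤ 2)),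
    PySem.List.pyRange_one_eq_nil (by exact_mod_cast hn : ((r0.length : Int) ≤ 2))]
  simp

theorem check_spec_aux (board : List (List Int)) (h : Pre_check_board_valid_py board) :
    check_board_valid_py board = check_board_valid_py_alt board := by
  obtain ⟨hne, hcase⟩ := h
  obtain ⟨r0, rest, rfl⟩ := List.exists_cons_of_ne_nil hne
  rcases hcase with hlenm | ⟨hm, hw⟩
  · have hlenm' : ∀ r ∈ r0 :: rest, r.length = r0.length := by simpa using hlenm
    have hlen : ∀ j, j < (r0 :: rest).length → (((r0 :: rest).getD j []).length = r0.length) :=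
      (forall_mem_getD _ [] _).mp hlenm'
    rw [alt_char r0 rest (fun row hr => hlenm' row (List.mem_cons_of_mem _ hr))]
    simp only [check_board_valid_py, PySem.List.pyGetD_zero_cons]
    exact pvIteAnd _ _ _ _
      ((vert_iff (r0 :: rest) r0.length hlen).trans
        (((not_iff_not.mpr (all_clean_iff _)).trans not_not).symm))
      ((hor_iff (r0 :: rest) r0.length hlen).trans
        (((not_iff_not.mpr (all_clean_iff _)).trans not_not).symm))
  · rw [small_A r0 rest hm (hw r0 (List.mem_cons_self ..)),
      small_alt r0 rest hm hw]

-- ===== VERDICT (by name: the statement is the Claim_ definition above) =====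
theorem check_board_valid_py_spec : Claim_equal_check_board_valid_py := by
  intro board _ hpre
  exact check_spec_aux board hpre
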